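-- pv_equiv track=rewrite | github.com/organvm-i-theoria/call-function--ontological | core/semiotics.py | _split_function_name
-- ===== SOURCE A (Python) =====
-- def _split_function_name(name: str) -> list[str]:
--     """Split a function name into constituent words.
--
--     Handles snake_case, kebab-case, and camelCase.
--     """
--     # Replace hyphens with underscores, then split on underscores.
--     normalized = name.replace("-", "_")
--     parts: list[str] = []
--     for segment in normalized.split("_"):
--         # Split camelCase within each segment.
--         current = ""
--         for char in segment:
--             if char.isupper() and current:
--                 parts.append(current.lower())
--                 current = char
--             else:
--                 current += char
--         if current:
--             parts.append(current.lower())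
--     return parts
-- ===== SOURCE B (Python) =====
-- def _split_function_name(name: str) -> list[str]:
--     """Split a function name into constituent words (snake/kebab/camel).
--
--     Single linear pass over the characters; no replace/split or nested loop.
--     """
--     parts: list[str] = []
--     current = ""
--     for char in name:
--         if char in "-_":
--             if current:
--                 parts.append(current.lower())
--             current = ""
--         elif char.isupper() and current:
--             parts.append(current.lower())
--             current = char
--         else:
--             current += char
--     if current:
--         parts.append(current.lower())
--     return parts
-- ===== Notes on version B (the rewrite author's own statement) =====
-- stated objective: simpler
-- what changed: Replaced the replace+split preprocessing and nested per-segment loop by one linear pass over the characters with a single current-word buffer flushed at separators and camelCase boundaries.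
import Mathlib
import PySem

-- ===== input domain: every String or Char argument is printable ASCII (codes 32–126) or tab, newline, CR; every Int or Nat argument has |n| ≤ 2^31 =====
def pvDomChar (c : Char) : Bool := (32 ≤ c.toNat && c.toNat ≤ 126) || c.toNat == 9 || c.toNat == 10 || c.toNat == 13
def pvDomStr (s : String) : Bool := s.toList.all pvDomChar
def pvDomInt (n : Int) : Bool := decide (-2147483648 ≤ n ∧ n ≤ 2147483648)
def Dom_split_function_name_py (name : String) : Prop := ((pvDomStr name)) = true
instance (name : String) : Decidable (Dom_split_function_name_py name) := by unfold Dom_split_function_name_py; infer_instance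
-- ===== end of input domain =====

-- B replaces A's replace+split preprocessing and nested per-segment loop by one
-- linear pass with a single current-word buffer (objective: simpler).

-- ===== PORT A =====
def split_function_name_py (name : String) : List String :=
  let normalized := PySem.Chars.replace name.toList ['-'] ['_']
  let parts := (PySem.Chars.splitOn normalized ['_']).foldl (fun parts segment =>
      let st := segment.foldl (fun (st : List (List Char) × List Char) char =>
        if PySem.Chars.isupper char && !st.2.isEmpty then
          (st.1 ++ [PySem.Chars.lower st.2], [char])
        else (st.1, st.2 ++ [char])) (parts, ([] : List Char))
      if st.2.isEmpty then st.1 else st.1 ++ [PySem.Chars.lower st.2]) []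
  parts.map String.mk

-- ===== PORT B =====
-- flush step of B: append current.lower() to parts only if current is non-empty
def pvFlushB (parts : List (List Char)) (cur : List Char) : List (List Char) :=
  if cur.isEmpty then parts else parts ++ [PySem.Chars.lower cur]

def split_function_name_py_alt (name : String) : List String :=
  let st := name.toList.foldl (fun (st : List (List Char) × List Char) c =>
    if c = '-' ∨ c = '_' then (pvFlushB st.1 st.2, [])
    else if PySem.Chars.isupper c && !st.2.isEmpty then (pvFlushB st.1 st.2, [c])
    else (st.1, st.2 ++ [c])) ([], ([] : List Char))
  (pvFlushB st.1 st.2).map String.mk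

-- ===== PRECONDITION & SPEC =====
def Spec_split_function_name_py (name : String) (out : List String) : Prop := out = split_function_name_py_alt name
instance (name : String) (out : List String) : Decidable (Spec_split_function_name_py name out) := by unfold Spec_split_function_name_py; infer_instance

-- ===== CLAIM (what is proved, stated in full; the proofs are below) =====
def Claim_equal_split_function_name_py : Prop := ∀ (name : String), Dom_split_function_name_py name → Spec_split_function_name_py name (split_function_name_py name)

-- ===== LEMMAS AND PROOFS =====

-- the inner (camelCase) step of A
def stepA (st : List (List Char) × List Char) (char : Char) : List (List Char) × List Char :=
  if PySem.Chars.isupper char && !st.2.isEmpty then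
    (st.1 ++ [PySem.Chars.lower st.2], [char])
  else (st.1, st.2 ++ [char])

-- B's step
def stepB (st : List (List Char) × List Char) (c : Char) : List (List Char) × List Char :=
  if c = '-' ∨ c = '_' then (pvFlushB st.1 st.2, [])
  else if PySem.Chars.isupper c && !st.2.isEmpty then (pvFlushB st.1 st.2, [c])
  else (st.1, st.2 ++ [c])

-- B as structural recursion
def FB : List (List Char) → List Char → List Char → List (List Char)
  | parts, cur, [] => pvFlushB parts cur
  | parts, cur, c :: t =>
    if c = '-' ∨ c = '_' then FB (pvFlushB parts cur) [] t
    else if PySem.Chars.isupper c && !cur.isEmpty then FB (pvFlushB parts cur) [c] t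
    else FB parts (cur ++ [c]) t

-- '-' → '_' character replacement
def repC (c : Char) : Char := if c = '-' then '_' else c

-- plain-recursion split on '_'
def mySplit : List Char → List Char → List (List Char)
  | cur, [] => [cur]
  | cur, c :: t => if c = '_' then cur :: mySplit [] t else mySplit (cur ++ [c]) t

def segFold (parts : List (List Char)) (segs : List (List Char)) : List (List Char) :=
  segs.foldl (fun parts segment =>
    let st := segment.foldl stepA (parts, ([] : List Char))
    if st.2.isEmpty then st.1 else st.1 ++ [PySem.Chars.lower st.2]) parts

lemma replace_go_eq (l acc : List Char) (fuel : Nat) (h : l.length ≤ fuel) :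
    PySem.Chars.replace.go ['-'] ['_'] fuel l acc = acc.reverse ++ l.map repC := by
  induction fuel generalizing l acc with
  | zero =>
    cases l with
    | nil => simp [PySem.Chars.replace.go]
    | cons c t => simp at h
  | succ f ih =>
    cases l with
    | nil => simp [PySem.Chars.replace.go]
    | cons c t =>
      simp only [List.length_cons, Nat.succ_le_succ_iff] at h
      by_cases hc : c = '-'
      · subst hc
        rw [show PySem.Chars.replace.go ['-'] ['_'] (f+1) ('-' :: t) acc
              = PySem.Chars.replace.go ['-'] ['_'] f t ('_' :: acc) by
            simp [PySem.Chars.replace.go, List.isPrefixOf]]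
        rw [ih t _ h]
        simp [repC]
      · rw [show PySem.Chars.replace.go ['-'] ['_'] (f+1) (c :: t) acc
              = PySem.Chars.replace.go ['-'] ['_'] f t (c :: acc) from by
              have hcs : ¬ ('-' = c) := fun h => hc h.symm
              simp [PySem.Chars.replace.go, List.isPrefixOf, hcs]]
        rw [ih t _ h]
        simp [repC, hc]

lemma replace_eq (cs : List Char) :
    PySem.Chars.replace cs ['-'] ['_'] = cs.map repC := by
  simpa using replace_go_eq cs [] cs.length (Nat.le_refl _)

lemma splitOn_go_eq (fuel : Nat) (l cur : List Char) (acc : List (List Char))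
    (h : l.length ≤ fuel) :
    PySem.Chars.splitOn.go ['_'] fuel l cur acc = acc.reverse ++ mySplit cur.reverse l := by
  induction fuel generalizing l cur acc with
  | zero =>
    cases l with
    | nil => simp [PySem.Chars.splitOn.go, mySplit]
    | cons c t => simp at h
  | succ f ih =>
    cases l with
    | nil => simp [PySem.Chars.splitOn.go, mySplit]
    | cons c t =>
      simp only [List.length_cons, Nat.succ_le_succ_iff] at h
      by_cases hc : c = '_'
      · subst hc
        rw [show PySem.Chars.splitOn.go ['_'] (f+1) ('_' :: t) cur acc
              = PySem.Chars.splitOn.go ['_'] f t [] (cur.reverse :: acc) by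
            simp [PySem.Chars.splitOn.go, List.isPrefixOf]]
        rw [ih t [] _ h]
        simp [mySplit]
      · rw [show PySem.Chars.splitOn.go ['_'] (f+1) (c :: t) cur acc
              = PySem.Chars.splitOn.go ['_'] f t (c :: cur) acc from by
              have hcs : ¬ ('_' = c) := fun h => hc h.symm
              simp [PySem.Chars.splitOn.go, List.isPrefixOf, hcs]]
        rw [ih t (c :: cur) _ h]
        simp [mySplit, hc]

lemma splitOn_eq (cs : List Char) :
    PySem.Chars.splitOn cs ['_'] = mySplit [] cs := by
  simpa using splitOn_go_eq (cs.length + 1) cs [] [] (Nat.le_succ _)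

lemma mySplit_ne_nil (l cur : List Char) : mySplit cur l ≠ [] := by
  induction l generalizing cur with
  | nil => simp [mySplit]
  | cons c t ih =>
    by_cases hc : c = '_' <;> simp [mySplit, hc, ih]

lemma segFold_cons (p : List (List Char)) (seg : List Char) (rest : List (List Char)) :
    segFold p (seg :: rest)
      = (let st := seg.foldl stepA (p, ([] : List Char))
         segFold (if st.2.isEmpty then st.1 else st.1 ++ [PySem.Chars.lower st.2]) rest) := by
  simp [segFold]

-- A continued from a pending state equals B's recursion (on '-'-free input)
lemma segFold_mySplit (l : List Char) (hl : '-' ∉ l) (cur0 : List Char)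
    (st : List (List Char) × List Char) :
    (match mySplit cur0 l with
     | [] => []
     | seg :: rest =>
       let st' := seg.foldl stepA st
       segFold (if st'.2.isEmpty then st'.1 else st'.1 ++ [PySem.Chars.lower st'.2]) rest)
    = FB (cur0.foldl stepA st).1 (cur0.foldl stepA st).2 l := by
  induction l generalizing cur0 st with
  | nil =>
    simp [mySplit, segFold, FB, pvFlushB]
  | cons c t ih =>
    have hct : '-' ∉ t := fun h => hl (List.mem_cons_of_mem _ h)
    have hcd : c ≠ '-' := fun h => hl (h ▸ List.mem_cons_self ..)
    by_cases hc : c = '_'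
    · subst hc
      have h1 : mySplit cur0 ('_' :: t) = cur0 :: mySplit [] t := by simp [mySplit]
      rw [h1]
      rcases hst : cur0.foldl stepA st with ⟨a, b⟩
      have h2 := ih hct [] ((if b.isEmpty then a else a ++ [PySem.Chars.lower b]), ([] : List Char))
      simp only [List.foldl_nil] at h2
      cases hms : mySplit ([] : List Char) t with
      | nil => exact absurd hms (mySplit_ne_nil t [])
      | cons s0 rest =>
        rw [hms] at h2
        simp only
        rw [hst, segFold_cons]
        simp only at h2 ⊢
        rw [h2]
        simp [FB, pvFlushB]
    · have h1 : mySplit cur0 (c :: t) = mySplit (cur0 ++ [c]) t := by simp [mySplit, hc]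
      rw [h1, ih hct (cur0 ++ [c]) st]
      have hfold : (cur0 ++ [c]).foldl stepA st = stepA (cur0.foldl stepA st) c := by
        simp
      rw [hfold]
      rw [show FB (cur0.foldl stepA st).1 (cur0.foldl stepA st).2 (c :: t)
            = if c = '-' ∨ c = '_' then FB (pvFlushB (cur0.foldl stepA st).1 (cur0.foldl stepA st).2) [] t
              else if PySem.Chars.isupper c && !(cur0.foldl stepA st).2.isEmpty then
                FB (pvFlushB (cur0.foldl stepA st).1 (cur0.foldl stepA st).2) [c] t
              else FB (cur0.foldl stepA st).1 ((cur0.foldl stepA st).2 ++ [c]) t from rfl]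
      simp only [hcd, hc, or_self, if_false]
      rcases hst : cur0.foldl stepA st with ⟨a, b⟩
      by_cases hu : PySem.Chars.isupper c && !b.isEmpty
      · have hb : b.isEmpty = false := by
          cases b <;> simp_all
        have hup : PySem.Chars.isupper c = true := by
          revert hu; cases PySem.Chars.isupper c <;> simp [hb]
        simp [stepA, hup, hb, pvFlushB]
      · simp [stepA, hu]

lemma FB_map_repC (cs : List Char) (parts : List (List Char)) (cur : List Char) :
    FB parts cur (cs.map repC) = FB parts cur cs := by
  induction cs generalizing parts cur with
  | nil => rfl
  | cons c t ih =>
    by_cases hc : c = '-'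
    · subst hc
      simp [repC, FB, ih]
    · by_cases hu : c = '_'
      · subst hu; simp [repC, FB, ih]
      · simp [repC, FB, hc, hu, ih]

lemma foldB_eq_FB (cs : List Char) (parts : List (List Char)) (cur : List Char) :
    pvFlushB (cs.foldl stepB (parts, cur)).1 (cs.foldl stepB (parts, cur)).2
      = FB parts cur cs := by
  induction cs generalizing parts cur with
  | nil => simp [FB]
  | cons c t ih =>
    rw [List.foldl_cons]
    rw [show FB parts cur (c :: t)
          = if c = '-' ∨ c = '_' then FB (pvFlushB parts cur) [] t
            else if PySem.Chars.isupper c && !cur.isEmpty then FB (pvFlushB parts cur) [c] t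
            else FB parts (cur ++ [c]) t from rfl]
    unfold stepB
    split_ifs with h1 h2
    · exact ih _ _
    · exact ih _ _
    · exact ih _ _

lemma no_dash_in_map_repC (cs : List Char) : '-' ∉ cs.map repC := by
  intro h
  rcases List.mem_map.mp h with ⟨c, _, hc⟩
  by_cases h' : c = '-' <;> simp [repC, h'] at hc

-- ===== VERDICT (by name: the statement is the Claim_ definition above) =====
theorem split_function_name_py_spec : Claim_equal_split_function_name_py := by
  intro name _
  simp only [Spec_split_function_name_py, split_function_name_py, split_function_name_py_alt]
  rw [replace_eq, splitOn_eq]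
  have hA : (mySplit [] (name.toList.map repC)).foldl (fun parts segment =>
      let st := segment.foldl (fun (st : List (List Char) × List Char) char =>
        if PySem.Chars.isupper char && !st.2.isEmpty then
          (st.1 ++ [PySem.Chars.lower st.2], [char])
        else (st.1, st.2 ++ [char])) (parts, ([] : List Char))
      if st.2.isEmpty then st.1 else st.1 ++ [PySem.Chars.lower st.2]) []
      = FB [] [] name.toList := by
    cases hms : mySplit ([] : List Char) (name.toList.map repC) with
    | nil => exact absurd hms (mySplit_ne_nil _ [])
    | cons s0 rest =>
      have h := segFold_mySplit (name.toList.map repC) (no_dash_in_map_repC _) []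
        (([] : List (List Char)), ([] : List Char))
      rw [hms] at h
      simp only [List.foldl_nil] at h
      rw [FB_map_repC] at h
      rw [← h, ← segFold_cons]
      rfl
  rw [hA, ← foldB_eq_FB]
  rfl
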